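-- pv_equiv track=rewrite | github.com/duilec/CS61A-spring2022 | homework/hw03/parsons_probs/neighbor_digits.py | neighbor_digits
-- ===== SOURCE A (Python) =====
-- def neighbor_digits(num, prev_digit=-1):
--     """
--     Returns the number of digits in num that have the same digit to its right
--     or left.
--     >>> neighbor_digits(111)
--     3
--     >>> neighbor_digits(123)
--     0
--     >>> neighbor_digits(112)
--     2
--     >>> neighbor_digits(1122)
--     4
--     """
--     "*** YOUR CODE HERE ***"
--     # if num == 0:
--     #     return 0
--     # elif num % 10 == prev_digit % 10 and num % 10 == (prev_digit // 100) % 10: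
--     #     return 1 + neighbor_digits(num // 10, num)
--     # elif num % 10 == (prev_digit // 10) % 10:
--     #     return 1 + neighbor_digits(num // 10, num)
--     # elif num % 10 != (num // 10) % 10:
--     #     return neighbor_digits(num // 10, num)
--     # else:
--     #     return neighbor_digits(num, num)
--
--     if num < 10:
--         return int(num == prev_digit)
--     last = num % 10
--     rest = num // 10
--     add_val = int(prev_digit == last or rest % 10 == last)
--     return add_val + neighbor_digits(num // 10, last)
-- ===== SOURCE B (Python) =====
-- def neighbor_digits(num, prev_digit=-1):
--     if num < 10:
--         return int(num == prev_digit)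
--     # build digits rightmost-first
--     digits = []
--     n = num
--     while n >= 10:
--         digits.append(n % 10)
--         n //= 10
--     digits.append(n)
--     count = 0
--     for i in range(len(digits)):
--         d = digits[i]
--         right = digits[i - 1] if i > 0 else prev_digit
--         if d == right or (i + 1 < len(digits) and digits[i + 1] == d):
--             count += 1
--     return count
-- ===== Notes on version B (the rewrite author's own statement) =====
-- stated objective: alternative
-- what changed: Replaces A's recursion over num (carrying the previous digit) by an explicit rightmost-first digit buffer built with a while loop, followed by one indexed counting loop that compares each digit with its right and left neighbours.
import Mathlib
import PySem

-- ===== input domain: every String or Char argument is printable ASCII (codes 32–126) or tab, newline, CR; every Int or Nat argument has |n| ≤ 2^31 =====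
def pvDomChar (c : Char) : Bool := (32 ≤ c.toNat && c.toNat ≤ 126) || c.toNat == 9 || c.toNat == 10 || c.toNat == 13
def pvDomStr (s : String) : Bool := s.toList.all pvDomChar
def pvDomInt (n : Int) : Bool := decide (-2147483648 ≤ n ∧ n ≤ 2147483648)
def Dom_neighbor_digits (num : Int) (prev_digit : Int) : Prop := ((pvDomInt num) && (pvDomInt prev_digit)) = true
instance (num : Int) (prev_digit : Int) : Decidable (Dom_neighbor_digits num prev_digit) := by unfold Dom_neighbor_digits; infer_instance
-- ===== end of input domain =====

-- B replaces A's recursion by an explicit digit buffer (rightmost-first) plus one indexed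
-- counting loop over it; objective: alternative decomposition, same cost.

-- ===== PORT A =====
-- literal transliteration of A's recursion
def neighbor_digits (num : Int) (prev_digit : Int) : Int :=
  if num < 10 then (if num = prev_digit then 1 else 0)
  else
    let last := PySem.Int.mod num 10
    let rest := PySem.Int.floordiv num 10
    let add_val : Int := if prev_digit = last ∨ PySem.Int.mod rest 10 = last then 1 else 0
    add_val + neighbor_digits (PySem.Int.floordiv num 10) last
termination_by num.toNat
decreasing_by
  rw [PySem.Int.floordiv_eq_ediv_of_pos (by norm_num)]
  omega

-- ===== PORT B =====
-- the while-loop of Source B building the digit list rightmost-first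
def pvBuildDigits (n : Int) (acc : List Int) : List Int :=
  if n < 10 then acc ++ [n]
  else pvBuildDigits (PySem.Int.floordiv n 10) (acc ++ [PySem.Int.mod n 10])
termination_by n.toNat
decreasing_by
  rw [PySem.Int.floordiv_eq_ediv_of_pos (by norm_num)]
  omega

def neighbor_digits_alt (num : Int) (prev_digit : Int) : Int :=
  if num < 10 then (if num = prev_digit then 1 else 0)
  else
    let digits := pvBuildDigits num []
    (List.range digits.length).foldl (fun c i =>
      let d := digits.getD i 0
      let right := if 0 < i then digits.getD (i - 1) 0 else prev_digit
      if d = right ∨ (i + 1 < digits.length ∧ digits.getD (i + 1) 0 = d) then c + 1 else c) 0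

-- ===== PRECONDITION & SPEC =====
def Spec_neighbor_digits (num : Int) (prev_digit : Int) (out : Int) : Prop := out = neighbor_digits_alt num prev_digit
instance (num : Int) (prev_digit : Int) (out : Int) : Decidable (Spec_neighbor_digits num prev_digit out) := by unfold Spec_neighbor_digits; infer_instance

-- ===== CLAIM (what is proved, stated in full; the proofs are below) =====
def Claim_equal_neighbor_digits : Prop := ∀ (num : Int) (prev_digit : Int), Dom_neighbor_digits num prev_digit → Spec_neighbor_digits num prev_digit (neighbor_digits num prev_digit)

-- ===== LEMMAS AND PROOFS =====

-- the digit list (rightmost first) as a plain recursion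
def pvDl (n : Int) : List Int :=
  if n < 10 then [n] else PySem.Int.mod n 10 :: pvDl (PySem.Int.floordiv n 10)
termination_by n.toNat
decreasing_by
  rw [PySem.Int.floordiv_eq_ediv_of_pos (by norm_num)]
  omega

-- count of neighbour matches over a rightmost-first digit list
def pvCnt : List Int → Int → Int
  | [], _ => 0
  | d :: ds, prev => (if d = prev ∨ ds.head? = some d then 1 else 0) + pvCnt ds d

theorem pvBuildDigits_eq (n : Int) (acc : List Int) : pvBuildDigits n acc = acc ++ pvDl n := by
  fun_induction pvBuildDigits n acc with
  | case1 n acc h => rw [pvDl, if_pos h]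
  | case2 n acc h ih => rw [pvDl, if_neg h, ih, List.append_assoc]; rfl

theorem pvDl_head? (m : Int) (hm : 0 ≤ m) :
    (pvDl m).head? = some (PySem.Int.mod m 10) := by
  rw [pvDl]
  split
  · rename_i hlt
    have : PySem.Int.mod m 10 = m := by
      rw [PySem.Int.mod_eq_emod_of_pos (by norm_num)]
      omega
    simp only [List.head?_cons, this]
  · simp

theorem neighbor_digits_eq_cnt (n prev : Int) : neighbor_digits n prev = pvCnt (pvDl n) prev := by
  fun_induction neighbor_digits n prev
  · rename_i p h
    rw [pvDl, if_pos h]; simp [pvCnt]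
  · rename_i a b h1 h2
    rw [pvDl, if_pos h1]; simp [pvCnt, h2]
  · rename_i a b h hl hr hav ih
    simp only [hav, hl, hr]
    rw [pvDl, if_neg h, pvCnt, ih]
    have hrest : (0:Int) ≤ PySem.Int.floordiv a 10 := by
      rw [PySem.Int.floordiv_eq_ediv_of_pos (by norm_num)]
      omega
    rw [pvDl_head? _ hrest]
    have hcond : (PySem.Int.mod a 10 = b ∨
        some (PySem.Int.mod (PySem.Int.floordiv a 10) 10) = some (PySem.Int.mod a 10))
        ↔ (b = PySem.Int.mod a 10 ∨
        PySem.Int.mod (PySem.Int.floordiv a 10) 10 = PySem.Int.mod a 10) := by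
      constructor
      · rintro (hx | hx)
        · exact Or.inl hx.symm
        · exact Or.inr (Option.some.injEq _ _ ▸ hx)
      · rintro (hx | hx)
        · exact Or.inl hx.symm
        · exact Or.inr (congrArg some hx)
    split_ifs with h1 h2 <;> first | rfl | tauto

-- indicator function of B's counting loop
def pvG (digits : List Int) (prev : Int) (i : Nat) : Int :=
  if digits.getD i 0 = (if 0 < i then digits.getD (i - 1) 0 else prev) ∨
      (i + 1 < digits.length ∧ digits.getD (i + 1) 0 = digits.getD i 0) then 1 else 0

theorem pvFoldl_add (g : Nat → Int) (l : List Nat) : ∀ c : Int,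
    l.foldl (fun c i => c + g i) c = c + (l.map g).sum := by
  induction l with
  | nil => intro c; simp
  | cons x xs ih => intro c; simp [List.foldl_cons, ih]; ring

theorem pvShift (d : Int) (ds : List Int) (prev : Int) (i : Nat) :
    pvG (d :: ds) prev (i + 1) = pvG ds d i := by
  unfold pvG
  rcases Nat.eq_zero_or_pos i with hi | hi
  · subst hi; simp [Nat.lt_iff_add_one_le]
  · obtain ⟨j, rfl⟩ : ∃ j, i = j + 1 := ⟨i - 1, by omega⟩
    simp

theorem pvSum_eq_cnt (ds : List Int) : ∀ prev : Int,
    ((List.range ds.length).map (pvG ds prev)).sum = pvCnt ds prev := by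
  induction ds with
  | nil => intro prev; simp [pvCnt]
  | cons d ds ih =>
    intro prev
    rw [List.length_cons, List.range_succ_eq_map, List.map_cons, List.map_map, List.sum_cons]
    have hmap : (List.range ds.length).map (pvG (d :: ds) prev ∘ Nat.succ)
        = (List.range ds.length).map (pvG ds d) := by
      apply List.map_congr_left
      intro i _
      exact pvShift d ds prev i
    rw [hmap, ih, pvCnt]
    have hg0 : pvG (d :: ds) prev 0 = (if d = prev ∨ ds.head? = some d then (1:Int) else 0) := by
      unfold pvG
      cases ds with
      | nil => simp
      | cons e es =>
        have htriv : 0 + 1 < es.length + 1 + 1 := by omega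
        simp [htriv]
    rw [hg0]

theorem alt_eq_cnt (n prev : Int) (h : ¬ n < 10) :
    neighbor_digits_alt n prev = pvCnt (pvDl n) prev := by
  rw [neighbor_digits_alt, if_neg h]
  have hb : pvBuildDigits n [] = pvDl n := by simp [pvBuildDigits_eq]
  simp only [hb]
  have hfun : (fun (c : Int) (i : Nat) =>
      let d := (pvDl n).getD i 0
      let right := if 0 < i then (pvDl n).getD (i - 1) 0 else prev
      if d = right ∨ (i + 1 < (pvDl n).length ∧ (pvDl n).getD (i + 1) 0 = d) then c + 1 else c)
      = (fun (c : Int) (i : Nat) => c + pvG (pvDl n) prev i) := by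
    funext c i
    simp only [pvG]
    split <;> split <;> rename_i hc <;> simp
  rw [hfun, pvFoldl_add, pvSum_eq_cnt]
  simp

-- ===== VERDICT (by name: the statement is the Claim_ definition above) =====
theorem neighbor_digits_spec : Claim_equal_neighbor_digits := by
  intro num prev _
  unfold Spec_neighbor_digits
  by_cases h : num < 10
  · rw [neighbor_digits, if_pos h, neighbor_digits_alt, if_pos h]
  · rw [neighbor_digits_eq_cnt, alt_eq_cnt num prev h]
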